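-- pv_equiv track=rewrite | github.com/xmriz/kuliah-main | DasPro-TPB2-Prosedural/TUBES-KELOMPOK-12-DASPRO/program-TUBES/lihat_game.py | arraybaru
-- ===== SOURCE A (Python) =====
-- def ngitung_panjang_matriks(matriks):
--     count = 0
--     for i in matriks:
--         count += 1
--     return count
--
-- def arraykosong(array) :
-- # prosedur arraykosong berfungsi untuk menghitung jumlah elemen yang bukan kosong("")
--     count = 0
--     for i in range (ngitung_panjang_matriks(array)) :
--         if array[i] != "" :
--             count += 1
--     return count
--
-- def arraybaru(array) :
-- # prosedur arraybaru berfungsi untuk menghapus element kosong("") di dalam array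
--     arraybaru = ["" for i in range (arraykosong(array))]
--
--     i = 0
--     while i  < (ngitung_panjang_matriks(arraybaru)) :
--         for j in range (ngitung_panjang_matriks(array)) :
--             if array[j] != "" :
--                 arraybaru[i] = array[j]
--                 i += 1
--     return arraybaru
-- ===== SOURCE B (Python) =====
-- def arraybaru(array):
--     # single pass: accumulate non-empty elements, no counting/preallocation
--     result = []
--     for x in array:
--         if x != "":
--             result.append(x)
--     return result
-- ===== Notes on version B (the rewrite author's own statement) =====
-- stated objective: simpler
-- what changed: Replaces A's count-then-preallocate-then-fill structure (two counting passes plus a while/for filling loop with a manual write index) by one pass that appends each non-empty element to an accumulator.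
import Mathlib
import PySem

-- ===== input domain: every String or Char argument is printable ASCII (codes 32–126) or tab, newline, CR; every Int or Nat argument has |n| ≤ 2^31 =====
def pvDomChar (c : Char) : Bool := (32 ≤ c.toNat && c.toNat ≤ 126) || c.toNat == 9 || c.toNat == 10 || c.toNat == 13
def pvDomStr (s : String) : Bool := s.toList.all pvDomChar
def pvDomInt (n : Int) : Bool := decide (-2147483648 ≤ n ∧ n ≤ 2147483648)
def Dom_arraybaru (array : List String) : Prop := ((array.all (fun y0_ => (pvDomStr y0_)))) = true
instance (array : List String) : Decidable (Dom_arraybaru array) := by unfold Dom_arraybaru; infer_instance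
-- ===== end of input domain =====

-- B removes A's count-then-preallocate-then-fill structure (two counting passes plus a
-- while/for filling loop with a manual write index): one pass appending non-empty elements.

-- ===== PORT A =====
-- ngitung_panjang_matriks: counts elements with an accumulator loop
def pvNgitung (matriks : List String) : Int :=
  matriks.foldl (fun count _ => count + 1) 0

-- arraykosong: counts non-empty elements via an index loop (indices are always in range,
-- so pyGetD with a dummy default is exact for array[i])
def pvArraykosong (array : List String) : Int :=
  (PySem.List.pyRange 0 (pvNgitung array) 1).foldl
    (fun count i => if PySem.List.pyGetD array i "" ≠ "" then count + 1 else count) 0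

-- the inner 'for j in range(...)' body of A's while loop; state = (arraybaru, i).
-- i is always ≥ 0 (starts at 0, only incremented), so .toNat is exact for arraybaru[i] = ...
def pvForFill (array : List String) (s : List String × Int) : List String × Int :=
  (PySem.List.pyRange 0 (pvNgitung array) 1).foldl
    (fun s j =>
      if PySem.List.pyGetD array j "" ≠ "" then
        (s.1.set s.2.toNat (PySem.List.pyGetD array j ""), s.2 + 1)
      else s) s

-- the 'while i < ngitung_panjang_matriks(arraybaru)' loop; fuel only makes the same
-- computation total (it is never exhausted: one pass of the for body already raises i to
-- the length, so fuel = length + 1 always suffices)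
def pvWhileFill (array : List String) : Nat → List String → Int → List String
  | 0, arr, _ => arr
  | fuel + 1, arr, i =>
    if i < pvNgitung arr then
      let s := pvForFill array (arr, i)
      pvWhileFill array fuel s.1 s.2
    else arr

def arraybaru (array : List String) : List String :=
  let arrb := (PySem.List.pyRange 0 (pvArraykosong array) 1).map (fun _ => "")
  pvWhileFill array (arrb.length + 1) arrb 0

-- ===== PORT B =====
def arraybaru_alt (array : List String) : List String :=
  array.foldl (fun result x => if x ≠ "" then result ++ [x] else result) []

-- ===== PRECONDITION & SPEC =====
def Spec_arraybaru (array : List String) (out : List String) : Prop := out = arraybaru_alt array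
instance (array : List String) (out : List String) : Decidable (Spec_arraybaru array out) := by unfold Spec_arraybaru; infer_instance

-- ===== CLAIM (what is proved, stated in full; the proofs are below) =====
def Claim_equal_arraybaru : Prop := ∀ (array : List String), Dom_arraybaru array → Spec_arraybaru array (arraybaru array)

-- ===== LEMMAS AND PROOFS =====

theorem pvNgitung_eq_length (l : List String) : pvNgitung l = (l.length : Int) := by
  suffices h : ∀ (c : Int), l.foldl (fun count _ => count + 1) c = c + l.length by
    simpa using h 0
  induction l with
  | nil => simp
  | cons a t ih => intro c; simp [List.foldl_cons, ih]; omega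

theorem pvArraykosong_eq (array : List String) :
    pvArraykosong array = ((array.filter (fun x => x ≠ "")).length : Int) := by
  unfold pvArraykosong
  rw [pvNgitung_eq_length]
  rw [PySem.List.foldl_pyRange_zero_pyGetD' array ""
        (fun count x => if x ≠ "" then count + 1 else count) 0]
  simpa [List.countP_eq_length_filter] using
    PySem.List.foldl_count_if (fun x => decide (x ≠ "")) array 0

theorem set_append_cons (pre rest : List String) (x y : String) :
    (pre ++ y :: rest).set pre.length x = pre ++ x :: rest := by
  induction pre with
  | nil => rfl
  | cons a t ih => simp [ih]

theorem pvForFill_eq (array : List String) :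
    pvForFill array = fun s =>
      array.foldl
        (fun s x => if x ≠ "" then (s.1.set s.2.toNat x, s.2 + 1) else s) s := by
  funext s
  unfold pvForFill
  rw [pvNgitung_eq_length]
  exact PySem.List.foldl_pyRange_zero_pyGetD' array ""
    (fun s x => if x ≠ "" then (s.1.set s.2.toNat x, s.2 + 1) else s) s

-- invariant of the filling pass: the prefix already written stays, the padding gets filled
theorem fill_invariant (l : List String) : ∀ (pre : List String),
    l.foldl (fun s x => if x ≠ "" then (s.1.set s.2.toNat x, s.2 + 1) else s)
        (pre ++ List.replicate (l.filter (fun x => x ≠ "")).length "", (pre.length : Int))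
      = (pre ++ l.filter (fun x => x ≠ ""),
         ((pre.length + (l.filter (fun x => x ≠ "")).length : Nat) : Int)) := by
  induction l with
  | nil => intro pre; simp
  | cons a t ih =>
    intro pre
    by_cases ha : a = ""
    · simpa [ha] using ih pre
    · have hfil : (a :: t).filter (fun x => x ≠ "") = a :: t.filter (fun x => x ≠ "") := by
        simp [ha]
      rw [hfil]
      simp only [List.foldl_cons, if_pos (by simpa using ha), List.length_cons,
        List.replicate_succ, Int.toNat_natCast, set_append_cons]
      have hpre : pre ++ a :: List.replicate (t.filter (fun x => x ≠ "")).length ""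
          = (pre ++ [a]) ++ List.replicate (t.filter (fun x => x ≠ "")).length "" := by
        simp
      have hone : ((pre.length : Int) + 1) = (((pre ++ [a]).length : Nat) : Int) := by
        simp
      rw [hpre, hone, ih (pre ++ [a])]
      refine Prod.ext (by simp) (by simp; omega)

theorem whileFill_eq (array : List String) :
    pvWhileFill array ((array.filter (fun x => x ≠ "")).length + 1)
      (List.replicate (array.filter (fun x => x ≠ "")).length "") 0
      = array.filter (fun x => x ≠ "") := by
  have hinv := fill_invariant array []
  simp only [List.nil_append, List.length_nil, Nat.cast_zero, Nat.zero_add] at hinv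
  cases hf : array.filter (fun x => x ≠ "") with
  | nil =>
    simp only [List.length_nil, List.replicate_zero]
    rw [pvWhileFill, if_neg (by rw [pvNgitung_eq_length]; simp)]
  | cons b bs =>
    rw [hf] at hinv
    simp only [List.length_cons]
    rw [pvWhileFill, if_pos (by rw [pvNgitung_eq_length]; simp)]
    rw [pvForFill_eq]
    simp only [List.length_cons] at hinv
    simp only [hinv]
    rw [pvWhileFill, if_neg (by rw [pvNgitung_eq_length]; simp only [List.length_cons]; push_cast; omega)]

theorem arraybaru_eq_filter (array : List String) :
    arraybaru array = array.filter (fun x => x ≠ "") := by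
  unfold arraybaru
  have hlen : (PySem.List.pyRange 0 (pvArraykosong array) 1).length
      = (array.filter (fun x => x ≠ "")).length := by
    rw [pvArraykosong_eq, PySem.List.length_pyRange_one]; omega
  have harrb : (PySem.List.pyRange 0 (pvArraykosong array) 1).map (fun _ => "")
      = List.replicate (array.filter (fun x => x ≠ "")).length "" := by
    rw [← hlen]; exact List.map_const'
  simp only [harrb, List.length_replicate]
  exact whileFill_eq array

theorem arraybaru_alt_eq_filter (array : List String) :
    arraybaru_alt array = array.filter (fun x => x ≠ "") := by
  unfold arraybaru_alt
  simpa using PySem.List.foldl_append_if (fun x => decide (x ≠ "")) id array []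

-- ===== VERDICT (by name: the statement is the Claim_ definition above) =====
theorem arraybaru_spec : Claim_equal_arraybaru := by
  intro array _
  unfold Spec_arraybaru
  rw [arraybaru_eq_filter, arraybaru_alt_eq_filter]
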